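-- pv_equiv track=rewrite | github.com/pur1fying/blue_archive_auto_script | window.py | update_config_reserve_old
-- ===== SOURCE A (Python) =====
-- def update_config_reserve_old(config_old, config_new):  # 保留旧配置原有的键，添加新配置中没有的，删除新配置中没有的键
--     for key in config_new:
--         if key not in config_old:
--             config_old[key] = config_new[key]
--     dels = []
--     for key in config_old:
--         if key not in config_new:
--             dels.append(key)
--     for key in dels:
--         del config_old[key]
--     return config_old
-- ===== SOURCE B (Python) =====
-- def update_config_reserve_old(config_old, config_new):
--     # Build the result fresh, then replace config_old's contents in place
--     # (A mutates config_old; we do the same via clear/update).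
--     result = {k: config_old[k] for k in config_old if k in config_new}
--     for k in config_new:
--         if k not in config_old:
--             result[k] = config_new[k]
--     config_old.clear()
--     config_old.update(result)
--     return config_old
-- ===== Notes on version B (the rewrite author's own statement) =====
-- stated objective: simpler
-- what changed: Instead of A's three surgical passes over config_old (insert missing keys, collect stale keys, delete them), B rebuilds the dict in one go: a comprehension keeping the shared keys with old values, plus one loop appending new-only keys, then clear/update to keep the in-place mutation.
import Mathlib
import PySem

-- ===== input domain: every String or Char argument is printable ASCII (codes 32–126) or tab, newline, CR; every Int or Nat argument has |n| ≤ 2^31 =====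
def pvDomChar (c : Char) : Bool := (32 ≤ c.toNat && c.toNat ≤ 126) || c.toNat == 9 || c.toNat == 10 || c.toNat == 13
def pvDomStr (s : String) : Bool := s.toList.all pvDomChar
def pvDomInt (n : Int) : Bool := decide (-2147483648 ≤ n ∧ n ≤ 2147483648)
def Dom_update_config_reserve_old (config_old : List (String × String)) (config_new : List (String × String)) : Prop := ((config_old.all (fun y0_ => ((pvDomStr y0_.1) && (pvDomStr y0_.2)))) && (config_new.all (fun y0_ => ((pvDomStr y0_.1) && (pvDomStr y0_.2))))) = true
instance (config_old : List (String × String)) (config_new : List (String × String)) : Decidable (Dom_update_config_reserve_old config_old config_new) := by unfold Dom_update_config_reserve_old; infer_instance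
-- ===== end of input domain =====

-- B rebuilds the merged dict in one reconstruction (kept-shared-keys ++ new-only keys)
-- instead of A's insert/collect/delete passes; both mutate config_old in place in Python,
-- the equivalence proved here is about the returned contents.


-- ===== PORT A =====
-- 'key in d' on a dict, over its association list
def pvKeyMem (d : List (String × String)) (k : String) : Bool := d.any (fun p => p.1 == k)

def update_config_reserve_old (config_old : List (String × String)) (config_new : List (String × String)) : List (String × String) :=
  -- for key in config_new: if key not in config_old: config_old[key] = config_new[key]
  -- (a dict's keys are unique, so the value looked up for 'key' is the pair's value)
  let old1 := config_new.foldl (fun acc kv => if pvKeyMem acc kv.1 then acc else acc ++ [kv]) config_old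
  -- dels = []; for key in config_old: if key not in config_new: dels.append(key)
  let dels := old1.foldl (fun ds kv => if pvKeyMem config_new kv.1 then ds else ds ++ [kv.1]) ([] : List String)
  -- for key in dels: del config_old[key]  (delete the entry with that key)
  dels.foldl (fun acc k => acc.eraseP (fun p => p.1 == k)) old1

-- ===== PORT B =====
def update_config_reserve_old_alt (config_old : List (String × String)) (config_new : List (String × String)) : List (String × String) :=
  -- result = {k: config_old[k] for k in config_old if k in config_new}
  let result := config_old.filter (fun kv => pvKeyMem config_new kv.1)
  -- for k in config_new: if k not in config_old: result[k] = config_new[k]  (k is fresh: append)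
  config_new.foldl (fun acc kv => if pvKeyMem config_old kv.1 then acc else acc ++ [kv]) result

-- ===== PRECONDITION & SPEC =====
-- Pre_ requires the association lists to have pairwise-distinct keys: the Python arguments
-- are dicts, whose keys are always unique, so a list with duplicate keys represents no
-- reachable Python input.
def Pre_update_config_reserve_old (config_old : List (String × String)) (config_new : List (String × String)) : Prop :=
  (config_old.map Prod.fst).Nodup ∧ (config_new.map Prod.fst).Nodup
instance (config_old : List (String × String)) (config_new : List (String × String)) : Decidable (Pre_update_config_reserve_old config_old config_new) := by unfold Pre_update_config_reserve_old; infer_instance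

def pvWitness_update_config_reserve_old : (List (String × String)) × (List (String × String)) :=
  ([("a", "1"), ("b", "2")], [("b", "9"), ("c", "3")])

def Spec_update_config_reserve_old (config_old : List (String × String)) (config_new : List (String × String)) (out : List (String × String)) : Prop := out = update_config_reserve_old_alt config_old config_new
instance (config_old : List (String × String)) (config_new : List (String × String)) (out : List (String × String)) : Decidable (Spec_update_config_reserve_old config_old config_new out) := by unfold Spec_update_config_reserve_old; infer_instance

-- ===== CLAIM (what is proved, stated in full; the proofs are below) =====
def Claim_equal_update_config_reserve_old : Prop := ∀ (config_old : List (String × String)) (config_new : List (String × String)), Dom_update_config_reserve_old config_old config_new → Pre_update_config_reserve_old config_old config_new → Spec_update_config_reserve_old config_old config_new (update_config_reserve_old config_old config_new)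

-- ===== LEMMAS AND PROOFS =====

-- A's first loop: appending the new pairs whose key is absent from the accumulator.
theorem pv_loop1 (old : List (String × String)) :
    ∀ (rest t : List (String × String)),
    (rest.map Prod.fst).Nodup →
    (∀ kv ∈ rest, pvKeyMem t kv.1 = false) →
    rest.foldl (fun acc kv => if pvKeyMem acc kv.1 then acc else acc ++ [kv]) (old ++ t)
      = old ++ t ++ rest.filter (fun kv => !pvKeyMem old kv.1) := by
  intro rest
  induction rest with
  | nil => intro t _ _; simp
  | cons kv tl ih =>
    intro t hnd hdisj
    simp only [List.map_cons, List.nodup_cons] at hnd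
    have ht : pvKeyMem t kv.1 = false := hdisj kv (by simp)
    have hsplit : pvKeyMem (old ++ t) kv.1 = pvKeyMem old kv.1 := by
      unfold pvKeyMem
      rw [List.any_append, pvKeyMem] at *
      rw [ht, Bool.or_false]
    simp only [List.foldl_cons, List.filter_cons]
    cases hmem : pvKeyMem old kv.1 with
    | true =>
      have hc : pvKeyMem (old ++ t) kv.1 = true := by rw [hsplit, hmem]
      rw [if_pos hc]
      have := ih t hnd.2 (fun x hx => hdisj x (List.mem_cons_of_mem _ hx))
      simpa [hmem] using this
    | false =>
      have hc : ¬ (pvKeyMem (old ++ t) kv.1 = true) := by rw [hsplit, hmem]; simp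
      rw [if_neg hc]
      have hdisj' : ∀ x ∈ tl, pvKeyMem (t ++ [kv]) x.1 = false := by
        intro x hx
        have hxk : (kv.1 == x.1) = false := by
          by_contra hcx
          have : kv.1 = x.1 := by
            cases h' : (kv.1 == x.1) with
            | true => exact beq_iff_eq.1 h'
            | false => exact absurd h' hcx
          exact hnd.1 (this ▸ List.mem_map_of_mem (f := Prod.fst) hx)
        have h1 : pvKeyMem t x.1 = false := hdisj x (List.mem_cons_of_mem _ hx)
        unfold pvKeyMem at h1 ⊢
        rw [List.any_append, h1, Bool.false_or]
        simp [hxk]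
      rw [List.append_assoc old t [kv], ih (t ++ [kv]) hnd.2 hdisj']
      simp [hmem, List.append_assoc]

-- A's second loop: collecting the keys of the entries whose key is absent from config_new.
theorem pv_loop2 (c : List (String × String)) :
    ∀ (l : List (String × String)) (ds : List String),
    l.foldl (fun ds kv => if pvKeyMem c kv.1 then ds else ds ++ [kv.1]) ds
      = ds ++ (l.filter (fun kv => !pvKeyMem c kv.1)).map Prod.fst := by
  intro l
  induction l with
  | nil => intro ds; simp
  | cons kv tl ih =>
    intro ds
    simp only [List.foldl_cons, List.filter_cons]
    cases h : pvKeyMem c kv.1 <;> simp [h, ih, List.append_assoc]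

-- del on a Nodup-keyed association list is a filter.
theorem pv_eraseP_eq_filter (k : String) :
    ∀ (l : List (String × String)), (l.map Prod.fst).Nodup →
    l.eraseP (fun p => p.1 == k) = l.filter (fun p => !(p.1 == k)) := by
  intro l
  induction l with
  | nil => intro _; simp
  | cons x xs ih =>
    intro hnd
    simp only [List.map_cons, List.nodup_cons] at hnd
    cases hx : (x.1 == k) with
    | true =>
      have hk : x.1 = k := beq_iff_eq.1 hx
      have : xs.filter (fun p => !(p.1 == k)) = xs := by
        apply List.filter_eq_self.2
        intro p hp
        simp only [Bool.not_eq_eq_eq_not, Bool.not_true, beq_eq_false_iff_ne]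
        intro hc
        exact hnd.1 ((hk ▸ hc : p.1 = x.1) ▸ List.mem_map_of_mem (f := Prod.fst) hp)
      simp [List.eraseP_cons, List.filter_cons, hx, this]
    | false =>
      simp [List.eraseP_cons, List.filter_cons, hx, ih hnd.2]

-- A's deletion loop on a Nodup-keyed list is one filter over the collected keys.
theorem pv_loop3 :
    ∀ (ks : List String) (l : List (String × String)), (l.map Prod.fst).Nodup →
    ks.foldl (fun acc k => acc.eraseP (fun p => p.1 == k)) l
      = l.filter (fun kv => !ks.any (fun k => k == kv.1)) := by
  intro ks
  induction ks with
  | nil => intro l _; simp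
  | cons k tl ih =>
    intro l hnd
    simp only [List.foldl_cons]
    rw [pv_eraseP_eq_filter k l hnd]
    have hnd' : ((l.filter (fun p => !(p.1 == k))).map Prod.fst).Nodup :=
      (List.Sublist.map Prod.fst l.filter_sublist).nodup hnd
    rw [ih _ hnd', List.filter_filter]
    apply List.filter_congr
    intro kv _
    cases h1 : (kv.1 == k) <;> cases h2 : (k == kv.1) <;>
      simp_all [BEq.comm (a := kv.1) (b := k)]

-- pvKeyMem is membership among the keys.
theorem pvKeyMem_iff (d : List (String × String)) (k : String) :
    pvKeyMem d k = true ↔ k ∈ d.map Prod.fst := by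
  simp [pvKeyMem, List.any_eq_true, List.mem_map, beq_iff_eq]

-- B's loop: the condition does not inspect the accumulator, so it is one filter.
theorem pv_loopB (old : List (String × String)) :
    ∀ (l acc : List (String × String)),
    l.foldl (fun acc kv => if pvKeyMem old kv.1 then acc else acc ++ [kv]) acc
      = acc ++ l.filter (fun kv => !pvKeyMem old kv.1) := by
  intro l
  induction l with
  | nil => intro acc; simp
  | cons kv tl ih =>
    intro acc
    simp only [List.foldl_cons, List.filter_cons]
    cases h : pvKeyMem old kv.1 <;> simp [h, ih, List.append_assoc]

-- ===== VERDICT (by name: the statement is the Claim_ definition above) =====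
theorem update_config_reserve_old_spec : Claim_equal_update_config_reserve_old := by
  intro old new _ hpre
  obtain ⟨hO, hN⟩ := hpre
  unfold Spec_update_config_reserve_old update_config_reserve_old update_config_reserve_old_alt
  dsimp only
  -- step 1: A's first loop appends exactly the new-only pairs
  have h1 : new.foldl (fun acc kv => if pvKeyMem acc kv.1 then acc else acc ++ [kv]) old
      = old ++ new.filter (fun kv => !pvKeyMem old kv.1) := by
    have := pv_loop1 old new [] hN (by intro kv _; simp [pvKeyMem])
    simpa using this
  rw [h1]
  -- every appended pair has its key in new
  have hAddKey : ∀ kv ∈ new.filter (fun kv => !pvKeyMem old kv.1), pvKeyMem new kv.1 = true := by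
    intro kv hkv
    exact (pvKeyMem_iff new kv.1).2 (List.mem_map_of_mem (List.mem_of_mem_filter hkv))
  -- step 2: dels = keys of old entries absent from new
  rw [pv_loop2 new]
  have hAddNil : (new.filter (fun kv => !pvKeyMem old kv.1)).filter
      (fun kv => !pvKeyMem new kv.1) = [] := by
    apply List.filter_eq_nil_iff.2
    intro kv hkv
    simp [hAddKey kv hkv]
  have hDels : ((old ++ new.filter (fun kv => !pvKeyMem old kv.1)).filter
        (fun kv => !pvKeyMem new kv.1)).map Prod.fst
      = (old.filter (fun kv => !pvKeyMem new kv.1)).map Prod.fst := by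
    rw [List.filter_append, hAddNil]
    simp
  rw [List.nil_append, hDels]
  -- keys of A's intermediate list are Nodup
  have hndAdd : ((new.filter (fun kv => !pvKeyMem old kv.1)).map Prod.fst).Nodup :=
    (List.Sublist.map Prod.fst new.filter_sublist).nodup hN
  have hnd1 : ((old ++ new.filter (fun kv => !pvKeyMem old kv.1)).map Prod.fst).Nodup := by
    rw [List.map_append]
    refine List.Nodup.append hO hndAdd ?_
    intro k hk1 hk2
    obtain ⟨kv, hkv, rfl⟩ := List.mem_map.1 hk2
    have hnot : pvKeyMem old kv.1 = false := by
      have := List.of_mem_filter hkv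
      simpa using this
    exact ((pvKeyMem_iff old kv.1).not.1 (by simp [hnot])) hk1
  -- step 3: the deletion loop is one filter over the unique keys
  rw [pv_loop3 _ _ hnd1, List.filter_append]
  -- on old entries, key-membership in dels is exactly absence from new
  have hOldPart : old.filter (fun kv =>
        !((old.filter (fun kv => !pvKeyMem new kv.1)).map Prod.fst).any (fun k => k == kv.1))
      = old.filter (fun kv => pvKeyMem new kv.1) := by
    apply List.filter_congr
    intro kv hkv
    have hany : ((old.filter (fun kv => !pvKeyMem new kv.1)).map Prod.fst).any
        (fun k => k == kv.1) = !pvKeyMem new kv.1 := by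
      cases hmem : pvKeyMem new kv.1 with
      | true =>
        apply List.any_eq_false.2
        intro k hk
        obtain ⟨kv2, hkv2, rfl⟩ := List.mem_map.1 hk
        have hkv2c : pvKeyMem new kv2.1 = false := by
          have := List.of_mem_filter hkv2
          simpa using this
        intro hbe
        have heq : kv2.1 = kv.1 := beq_iff_eq.1 hbe
        rw [heq, hmem] at hkv2c
        exact Bool.true_eq_false.mp hkv2c
      | false =>
        apply List.any_eq_true.2
        refine ⟨kv.1, ?_, by simp⟩
        exact List.mem_map_of_mem (List.mem_filter.2 ⟨hkv, by simp [hmem]⟩)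
    rw [hany, Bool.not_not]
  -- on appended entries, the key is never in dels (it is not a key of old)
  have hAddPart : (new.filter (fun kv => !pvKeyMem old kv.1)).filter (fun kv =>
        !((old.filter (fun kv => !pvKeyMem new kv.1)).map Prod.fst).any (fun k => k == kv.1))
      = new.filter (fun kv => !pvKeyMem old kv.1) := by
    apply List.filter_eq_self.2
    intro kv hkv
    have hnot : pvKeyMem old kv.1 = false := by
      have := List.of_mem_filter hkv
      simpa using this
    simp only [Bool.not_eq_eq_eq_not, Bool.not_false]
    apply List.any_eq_false.2
    intro k hk
    obtain ⟨kv2, hkv2, rfl⟩ := List.mem_map.1 hk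
    intro hbe
    have heq : kv2.1 = kv.1 := beq_iff_eq.1 hbe
    have : pvKeyMem old kv.1 = true :=
      (pvKeyMem_iff old kv.1).2 (heq ▸ List.mem_map_of_mem (List.mem_of_mem_filter hkv2))
    rw [this] at hnot
    exact Bool.true_eq_false.mp hnot
  rw [hOldPart, hAddPart, pv_loopB]
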